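-- pv_equiv track=rewrite | github.com/peter-coulson/fluent-forever-v2 | src/cli/utils/validation.py | validate_card_list
-- ===== SOURCE A (Python) =====
-- def validate_card_list(cards: str) -> list[str]:
--     """Validate card ID list format.
--
--     Args:
--         cards: Comma-separated card ID list
--
--     Returns:
--         List of validation errors
--     """
--     errors = []
--     if not cards:
--         errors.append("Card list cannot be empty")
--         return errors
--
--     card_list = [c.strip() for c in cards.split(",") if c.strip()]
--     if not card_list:
--         errors.append("No valid card IDs found in card list")
--
--     return errors
-- ===== SOURCE B (Python) =====
-- def validate_card_list(cards: str) -> list[str]: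
--     """Validate card ID list format: single character-level scan, no split."""
--     if not cards:
--         return ["Card list cannot be empty"]
--     if any(c != "," and not c.isspace() for c in cards):
--         return []
--     return ["No valid card IDs found in card list"]
-- ===== Notes on version B (the rewrite author's own statement) =====
-- stated objective: simpler
-- what changed: Replaces split-on-comma, per-token strip and list filtering with one character-level any() scan: a valid card ID exists iff some character is neither a comma nor whitespace.
import Mathlib
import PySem

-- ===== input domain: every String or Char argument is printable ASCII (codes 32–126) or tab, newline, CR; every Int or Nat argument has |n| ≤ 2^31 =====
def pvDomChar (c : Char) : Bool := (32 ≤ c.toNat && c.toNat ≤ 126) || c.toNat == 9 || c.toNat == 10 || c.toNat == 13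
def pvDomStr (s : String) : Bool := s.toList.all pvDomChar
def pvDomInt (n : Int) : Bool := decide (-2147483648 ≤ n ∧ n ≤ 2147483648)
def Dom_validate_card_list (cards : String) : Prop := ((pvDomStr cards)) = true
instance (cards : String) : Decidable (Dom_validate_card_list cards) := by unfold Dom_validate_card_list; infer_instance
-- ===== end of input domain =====

-- B replaces split/strip/filter with one character-level any-scan (a valid ID exists iff some char is neither ',' nor whitespace): simpler, same O(n) cost.

-- ===== PORT A =====
def validate_card_list (cards : String) : List String :=
  let errors : List String := []
  if cards.toList = [] then
    errors ++ ["Card list cannot be empty"]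
  else
    let card_list : List (List Char) :=
      ((PySem.Chars.splitOn cards.toList [',']).map PySem.Chars.strip).filter (fun t => t ≠ [])
    if card_list = [] then errors ++ ["No valid card IDs found in card list"]
    else errors

-- ===== PORT B =====
def validate_card_list_alt (cards : String) : List String :=
  if cards.toList = [] then ["Card list cannot be empty"]
  else if cards.toList.any (fun c => !(c == ',') && !PySem.Chars.isspace c) then []
  else ["No valid card IDs found in card list"]

-- ===== PRECONDITION & SPEC =====
def Spec_validate_card_list (cards : String) (out : List String) : Prop := out = validate_card_list_alt cards
instance (cards : String) (out : List String) : Decidable (Spec_validate_card_list cards out) := by unfold Spec_validate_card_list; infer_instance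

-- ===== CLAIM (what is proved, stated in full; the proofs are below) =====
def Claim_equal_validate_card_list : Prop := ∀ (cards : String), Dom_validate_card_list cards → Spec_validate_card_list cards (validate_card_list cards)

-- ===== LEMMAS AND PROOFS =====

-- Reference recursion describing splitOn-on-',' (used only in proofs)
def splitSpec : List Char → List Char → List (List Char)
  | [], cur => [cur.reverse]
  | c :: r, cur => if c == ',' then cur.reverse :: splitSpec r [] else splitSpec r (c :: cur)

theorem splitOn_go_spec : ∀ (fuel : Nat) (l cur : List Char) (acc : List (List Char)),
    l.length < fuel →
    PySem.Chars.splitOn.go [','] fuel l cur acc = acc.reverse ++ splitSpec l cur := by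
  intro fuel
  induction fuel with
  | zero => intro l cur acc h; exact absurd h (by omega)
  | succ f ih =>
    intro l cur acc h
    cases l with
    | nil => simp [PySem.Chars.splitOn.go, splitSpec]
    | cons c t =>
      rw [PySem.Chars.splitOn.go]
      by_cases hc : c = ','
      · subst hc
        have hp : ([','].isPrefixOf (',' :: t)) = true := by simp [List.isPrefixOf]
        rw [hp]
        simp only [if_true, List.length_cons, List.length_nil, Nat.zero_add,
          List.drop_succ_cons, List.drop_zero]
        rw [ih t [] (cur.reverse :: acc) (by simp at h; omega)]
        simp [splitSpec]
      · have hp : ([','].isPrefixOf (c :: t)) = false := by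
          simp [List.isPrefixOf]; exact fun h => absurd h.symm hc
        rw [hp]
        simp only [Bool.false_eq_true, if_false]
        rw [ih t (c :: cur) acc (by simp at h; omega)]
        simp [splitSpec, hc]

theorem strip_eq_nil_iff (cs : List Char) :
    PySem.Chars.strip cs = [] ↔ ∀ x ∈ cs, PySem.Chars.isspace x = true := by
  unfold PySem.Chars.strip PySem.Chars.rstrip PySem.Chars.lstrip
  rw [List.reverse_eq_nil_iff, List.dropWhile_eq_nil_iff]
  constructor
  · intro h x hx
    rw [← List.takeWhile_append_dropWhile (p := PySem.Chars.isspace) (l := cs)] at hx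
    rcases List.mem_append.1 hx with h1 | h2
    · exact List.mem_takeWhile_imp h1
    · exact h _ (List.mem_reverse.2 h2)
  · intro h x hx
    exact h _ ((List.dropWhile_sublist _).subset (List.mem_reverse.1 hx))

theorem splitSpec_all (l : List Char) : ∀ (cur : List Char),
    ((∀ t ∈ splitSpec l cur, PySem.Chars.strip t = []) ↔
      ((∀ x ∈ cur, PySem.Chars.isspace x = true) ∧
        ∀ x ∈ l, x = ',' ∨ PySem.Chars.isspace x = true)) := by
  induction l with
  | nil => intro cur; simp [splitSpec, strip_eq_nil_iff]
  | cons c r ih =>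
    intro cur
    by_cases hc : c = ','
    · subst hc
      have hs : splitSpec (',' :: r) cur = cur.reverse :: splitSpec r [] := by
        simp [splitSpec]
      rw [hs]
      simp only [List.mem_cons, forall_eq_or_imp]
      rw [ih [], strip_eq_nil_iff]
      simp only [List.mem_reverse, List.not_mem_nil, false_implies, implies_true, true_and]
      tauto
    · have hs : splitSpec (c :: r) cur = splitSpec r (c :: cur) := by
        simp [splitSpec, hc]
      rw [hs, ih (c :: cur)]
      simp only [List.mem_cons, forall_eq_or_imp]
      constructor
      · rintro ⟨⟨h0, h1⟩, h2⟩
        exact ⟨h1, Or.inr h0, h2⟩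
      · rintro ⟨h1, hc2, h2⟩
        exact ⟨⟨hc2.resolve_left hc, h1⟩, h2⟩

-- A's filtered-list-empty condition is the negation of B's any-scan
theorem conds_iff (cs : List Char) :
    ((((PySem.Chars.splitOn cs [',']).map PySem.Chars.strip).filter (fun t => t ≠ []) = []) ↔
      (cs.any (fun c => !(c == ',') && !PySem.Chars.isspace c) = false)) := by
  have hA : PySem.Chars.splitOn cs [','] = splitSpec cs [] := by
    unfold PySem.Chars.splitOn
    rw [splitOn_go_spec _ _ _ _ (by omega)]
    simp
  rw [hA]
  have hL : ((((splitSpec cs []).map PySem.Chars.strip).filter (fun t => t ≠ []) = []) ↔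
      ∀ t ∈ splitSpec cs [], PySem.Chars.strip t = []) := by
    simp [List.filter_eq_nil_iff]
  rw [hL, splitSpec_all]
  simp only [List.not_mem_nil, false_implies, implies_true, true_and]
  rw [List.any_eq_false]
  constructor
  · intro h x hx
    rcases h x hx with rfl | hs
    · simp
    · simp [hs]
  · intro h x hx
    have := h x hx
    by_cases hc : x = ','
    · exact Or.inl hc
    · right
      simpa [hc] using this

-- ===== VERDICT (by name: the statement is the Claim_ definition above) =====
theorem validate_card_list_spec : Claim_equal_validate_card_list := by
  intro cards _
  unfold Spec_validate_card_list validate_card_list validate_card_list_alt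
  by_cases h0 : cards.toList = []
  · simp [h0]
  · simp only [h0, if_false, List.nil_append]
    rcases h : cards.toList.any (fun c => !(c == ',') && !PySem.Chars.isspace c) with _ | _
    · rw [if_pos ((conds_iff cards.toList).2 h)]
      simp [h]
    · rw [if_neg (fun hcontr => by
        have := (conds_iff cards.toList).1 hcontr
        simp [h] at this)]
      simp [h]
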